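-- pv_equiv track=rewrite | github.com/daniel-reich/ubiquitous-fiesta | wvuk7d2mWgZEmFFYD_15.py | shared_letters
-- ===== SOURCE A (Python) =====
-- def shared_letters(txt1, txt2):
--   count1=0
--   count2=0
--   a=[txt2.count(i) for i in txt1]
--   for j in a:
--     if j>0:
--       count1+=1
--   b=[txt1.count(i) for i in txt2]
--   for j in b:
--     if j>0:
--       count2+=1
--   return min(count1,count2)
-- ===== SOURCE B (Python) =====
-- def shared_letters(txt1, txt2):
--   common = set(txt1) & set(txt2)
--   count1 = sum(txt1.count(c) for c in common)
--   count2 = sum(txt2.count(c) for c in common)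
--   return min(count1, count2)
-- ===== Notes on version B (the rewrite author's own statement) =====
-- stated objective: faster
-- what changed: Builds the set of shared letters once and sums per-distinct-letter counts over it, instead of scanning every character position of each string and running txt.count (a full scan) per position.
import Mathlib
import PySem

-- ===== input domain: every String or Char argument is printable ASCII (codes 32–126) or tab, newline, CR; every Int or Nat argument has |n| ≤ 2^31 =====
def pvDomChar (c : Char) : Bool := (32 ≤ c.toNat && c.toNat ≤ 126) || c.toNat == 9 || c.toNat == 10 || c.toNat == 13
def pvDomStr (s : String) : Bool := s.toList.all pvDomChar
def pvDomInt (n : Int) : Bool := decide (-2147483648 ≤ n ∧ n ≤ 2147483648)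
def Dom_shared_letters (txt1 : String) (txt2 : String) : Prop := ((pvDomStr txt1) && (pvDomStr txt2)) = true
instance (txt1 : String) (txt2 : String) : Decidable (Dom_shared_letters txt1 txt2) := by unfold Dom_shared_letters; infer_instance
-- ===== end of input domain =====

-- B builds the set of shared letters once and sums per-distinct-letter counts, instead of
-- scanning every character position of each string with a full .count scan per position (objective: faster).

-- ===== PORT A =====
-- txt2.count(i) with i a 1-character string is Python's substring count, which for a
-- single character equals the character count: ported exactly as List.count on .toList.
def shared_letters (txt1 : String) (txt2 : String) : Int :=
  let a := txt1.toList.map (fun i => (txt2.toList.count i : Int))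
  let count1 := a.foldl (fun acc j => if j > 0 then acc + 1 else acc) (0 : Int)
  let b := txt2.toList.map (fun i => (txt1.toList.count i : Int))
  let count2 := b.foldl (fun acc j => if j > 0 then acc + 1 else acc) (0 : Int)
  min count1 count2

-- ===== PORT B =====
def shared_letters_alt (txt1 : String) (txt2 : String) : Int :=
  let common : PySem.Set Char :=
    PySem.Set.inter (PySem.Set.ofList txt1.toList) (PySem.Set.ofList txt2.toList)
  let count1 : Int := (common.map (fun c => (txt1.toList.count c : Int))).sum
  let count2 : Int := (common.map (fun c => (txt2.toList.count c : Int))).sum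
  min count1 count2

-- ===== PRECONDITION & SPEC =====
def Spec_shared_letters (txt1 : String) (txt2 : String) (out : Int) : Prop := out = shared_letters_alt txt1 txt2
instance (txt1 : String) (txt2 : String) (out : Int) : Decidable (Spec_shared_letters txt1 txt2 out) := by unfold Spec_shared_letters; infer_instance

-- ===== CLAIM (what is proved, stated in full; the proofs are below) =====
def Claim_equal_shared_letters : Prop := ∀ (txt1 : String) (txt2 : String), Dom_shared_letters txt1 txt2 → Spec_shared_letters txt1 txt2 (shared_letters txt1 txt2)

-- ===== LEMMAS AND PROOFS =====

-- A's side of one direction: the fold over the mapped count list counts the positions of l1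
-- whose character occurs in l2.
theorem pvA_side (l1 l2 : List Char) :
    (l1.map (fun i => (l2.count i : Int))).foldl
      (fun acc j => if j > 0 then acc + 1 else acc) (0 : Int)
      = (l1.countP (fun c => decide (c ∈ l2)) : Int) := by
  rw [PySem.List.foldl_ite_add_one]
  rw [List.countP_map]
  simp only [Function.comp_def, gt_iff_lt, zero_add]
  congr 1
  refine List.countP_congr (fun c _ => ?_)
  simp [List.count_pos_iff]

-- B's side: summing l.count over a nodup list whose members are exactly the characters of l
-- that lie in m gives the number of positions of l with character in m.
theorem pvB_side (l m : List Char) (s : List Char) (hnd : s.Nodup)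
    (hmem : ∀ c, c ∈ s ↔ c ∈ l ∧ c ∈ m) :
    (s.map (fun c => (l.count c : Int))).sum = (l.countP (fun c => decide (c ∈ m)) : Int) := by
  have hf : ∀ c ∈ s, (l.count c : Int) = ((l.filter (fun c => decide (c ∈ m))).count c : Int) := by
    intro c hc
    rw [List.count_filter]
    simp [(hmem c).1 hc]
  rw [List.map_congr_left hf]
  set f := l.filter (fun c => decide (c ∈ m)) with hfdef
  have hperm : List.Perm s f.dedup := by
    refine (List.perm_ext_iff_of_nodup hnd (List.nodup_dedup f)).2 (fun c => ?_)
    rw [List.mem_dedup, hfdef, List.mem_filter]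
    simp [hmem]
  rw [List.Perm.sum_eq (hperm.map _)]
  have : (f.dedup.map fun c => f.count c).sum = f.length := by
    simpa using List.sum_map_count_dedup_eq_length f
  rw [List.countP_eq_length_filter, ← hfdef, ← this, Nat.cast_list_sum, List.map_map]
  rfl

-- common = set(txt1) & set(txt2): nodup, with the right membership.
theorem pvCommon_nodup (l1 l2 : List Char) :
    (PySem.Set.inter (PySem.Set.ofList l1) (PySem.Set.ofList l2)).Nodup :=
  PySem.Set.nodup_inter _ _ (PySem.Set.nodup_ofList l1)

theorem pvCommon_mem (l1 l2 : List Char) (c : Char) :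
    c ∈ PySem.Set.inter (PySem.Set.ofList l1) (PySem.Set.ofList l2) ↔ c ∈ l1 ∧ c ∈ l2 := by
  rw [PySem.Set.mem_inter]
  simp [PySem.Set.mem_ofList]

-- ===== VERDICT (by name: the statement is the Claim_ definition above) =====
theorem shared_letters_spec : Claim_equal_shared_letters := by
  intro txt1 txt2 _
  unfold Spec_shared_letters shared_letters shared_letters_alt
  simp only
  rw [pvA_side, pvA_side,
    pvB_side txt1.toList txt2.toList _ (pvCommon_nodup _ _) (pvCommon_mem _ _),
    pvB_side txt2.toList txt1.toList _ (pvCommon_nodup _ _) (fun c => by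
      rw [pvCommon_mem]; exact and_comm)]
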